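-- pv_equiv track=rewrite | github.com/zhangzihaoDT/AnaAssistant | tools/statistics_tool.py | _normalize_weekdays
-- ===== SOURCE A (Python) =====
-- def _normalize_weekdays(weekdays: list[int] | None) -> list[int]:
--     if not isinstance(weekdays, list) or not weekdays:
--         weekdays = [4, 5]
--     normalized = [int(w) for w in weekdays if isinstance(w, (int, float, str)) and str(w).isdigit()]
--     normalized = [w for w in normalized if 1 <= int(w) <= 7]
--     normalized = sorted(list(dict.fromkeys(int(w) for w in normalized)))
--     if not normalized:
--         return [4, 5]
--     return normalized
-- ===== SOURCE B (Python) =====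
-- def _normalize_weekdays(weekdays: list[int] | None) -> list[int]:
--     if not isinstance(weekdays, list) or not weekdays:
--         weekdays = [4, 5]
--     # One pass: OR each valid weekday into a 7-bit mask, then decode the
--     # mask's bits low-to-high, which yields the ascending deduped list.
--     mask = 0
--     for w in weekdays:
--         if isinstance(w, (int, float, str)) and str(w).isdigit():
--             v = int(w)
--             if 1 <= v <= 7:
--                 mask |= 1 << v
--     if mask == 0:
--         return [4, 5]
--     out = []
--     d = 1
--     m = mask >> 1
--     while m:
--         if m & 1:
--             out.append(d)
--         d += 1
--         m >>= 1
--     return out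
-- ===== Notes on version B (the rewrite author's own statement) =====
-- stated objective: alternative
-- what changed: Replaces filter-then-dict-dedup-then-comparison-sort with a single pass that ORs each valid weekday into a 7-bit integer mask, then decodes the mask's bits low-to-high; no sort, dict or set is used.
import Mathlib
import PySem

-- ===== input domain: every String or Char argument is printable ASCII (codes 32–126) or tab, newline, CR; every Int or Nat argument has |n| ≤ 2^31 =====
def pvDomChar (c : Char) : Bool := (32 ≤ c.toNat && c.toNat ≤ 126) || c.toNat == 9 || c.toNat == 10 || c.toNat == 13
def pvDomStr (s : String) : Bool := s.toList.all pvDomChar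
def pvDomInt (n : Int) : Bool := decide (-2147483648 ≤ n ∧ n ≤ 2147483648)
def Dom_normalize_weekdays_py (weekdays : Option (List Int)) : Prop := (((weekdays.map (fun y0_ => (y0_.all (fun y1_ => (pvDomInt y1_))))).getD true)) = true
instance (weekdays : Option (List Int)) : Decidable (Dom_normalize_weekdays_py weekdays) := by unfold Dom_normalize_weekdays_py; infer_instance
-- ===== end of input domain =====

-- B replaces the dict-dedup + comparison sort by a one-pass 7-bit integer mask decoded low-to-high (alternative algorithm; return value only).
-- ===== PORT A =====
def normalize_weekdays_py (weekdays : Option (List Int)) : List Int :=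
  -- if not isinstance(weekdays, list) or not weekdays: weekdays = [4, 5]
  let ws : List Int := match weekdays with
    | none => [4, 5]
    | some l => if l = [] then [4, 5] else l
  -- normalized = [int(w) for w in weekdays if isinstance(...) and str(w).isdigit()]  (w is int, so int(w) = w)
  let n1 := ws.filter (fun w => PySem.Str.strIsdigit (PySem.Int.toStr w))
  -- normalized = [w for w in normalized if 1 <= int(w) <= 7]
  let n2 := n1.filter (fun w => decide (1 ≤ w) && decide (w ≤ 7))
  -- normalized = sorted(list(dict.fromkeys(int(w) for w in normalized)))
  let n3 := PySem.List.sorted (PySem.List.dedup n2) (fun x => x) false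
  if n3 = [] then [4, 5] else n3

-- ===== PORT B =====
-- while m: if m & 1: out.append(d); d += 1; m >>= 1
def pvDecodeLoop (m : Nat) (d : Int) (out : List Int) : List Int :=
  if h : m = 0 then out
  else pvDecodeLoop (m / 2) (d + 1) (if m % 2 = 1 then out ++ [d] else out)
termination_by m
decreasing_by exact Nat.div_lt_self (Nat.pos_of_ne_zero h) one_lt_two

def normalize_weekdays_py_alt (weekdays : Option (List Int)) : List Int :=
  let ws : List Int := match weekdays with
    | none => [4, 5]
    | some l => if l = [] then [4, 5] else l
  -- for w in weekdays: if ... str(w).isdigit(): v = int(w); if 1 <= v <= 7: mask |= 1 << v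
  let mask : Nat := ws.foldl (fun mask w =>
    if PySem.Str.strIsdigit (PySem.Int.toStr w) then
      if 1 ≤ w ∧ w ≤ 7 then mask ||| (1 <<< w.toNat) else mask
    else mask) 0
  if mask = 0 then [4, 5]
  else pvDecodeLoop (mask >>> 1) 1 []

-- ===== PRECONDITION & SPEC =====
def Spec_normalize_weekdays_py (weekdays : Option (List Int)) (out : List Int) : Prop := out = normalize_weekdays_py_alt weekdays
instance (weekdays : Option (List Int)) (out : List Int) : Decidable (Spec_normalize_weekdays_py weekdays out) := by unfold Spec_normalize_weekdays_py; infer_instance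

-- ===== CLAIM (what is proved, stated in full; the proofs are below) =====
def Claim_equal_normalize_weekdays_py : Prop := ∀ (weekdays : Option (List Int)), Dom_normalize_weekdays_py weekdays → Spec_normalize_weekdays_py weekdays (normalize_weekdays_py weekdays)

-- ===== LEMMAS AND PROOFS =====

-- non-tail-recursive view of the decoding loop, for reasoning
def pvDecode (m : Nat) (d : Int) : List Int :=
  if h : m = 0 then []
  else (if m % 2 = 1 then [d] else []) ++ pvDecode (m / 2) (d + 1)
termination_by m
decreasing_by exact Nat.div_lt_self (Nat.pos_of_ne_zero h) one_lt_two

theorem pvDecodeLoop_eq (m : Nat) : ∀ (d : Int) (out : List Int),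
    pvDecodeLoop m d out = out ++ pvDecode m d := by
  induction m using Nat.strong_induction_on with
  | _ m ih =>
    intro d out
    rw [pvDecodeLoop, pvDecode]
    by_cases h : m = 0
    · simp [h]
    · simp only [dif_neg h]
      rw [ih (m / 2) (Nat.div_lt_self (Nat.pos_of_ne_zero h) one_lt_two)]
      by_cases h2 : m % 2 = 1 <;> simp [h2]

theorem mem_pvDecode (m : Nat) : ∀ (d a : Int),
    a ∈ pvDecode m d ↔ ∃ i : Nat, m.testBit i = true ∧ a = d + i := by
  induction m using Nat.strong_induction_on with
  | _ m ih =>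
    intro d a
    rw [pvDecode]
    by_cases h : m = 0
    · simp [h, Nat.zero_testBit]
    · simp only [dif_neg h, List.mem_append,
        ih (m / 2) (Nat.div_lt_self (Nat.pos_of_ne_zero h) one_lt_two)]
      constructor
      · rintro (hm | ⟨i, hb, rfl⟩)
        · by_cases h2 : m % 2 = 1
          · simp [h2] at hm
            exact ⟨0, by simp [Nat.testBit_zero, h2], by simp [hm]⟩
          · simp [h2] at hm
        · exact ⟨i + 1, by rw [Nat.testBit_succ]; exact hb, by push_cast; ring⟩
      · rintro ⟨i, hb, rfl⟩
        cases i with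
        | zero =>
          rw [Nat.testBit_zero, decide_eq_true_eq] at hb
          exact Or.inl (by simp [hb])
        | succ j =>
          rw [Nat.testBit_succ] at hb
          exact Or.inr ⟨j, hb, by push_cast; ring⟩

theorem pvDecode_ge (m : Nat) (d a : Int) (h : a ∈ pvDecode m d) : d ≤ a := by
  rw [mem_pvDecode] at h
  obtain ⟨i, _, rfl⟩ := h
  have : (0:Int) ≤ i := Int.natCast_nonneg i
  omega

theorem pvDecode_pairwise (m : Nat) : ∀ (d : Int),
    (pvDecode m d).Pairwise (· < ·) := by
  induction m using Nat.strong_induction_on with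
  | _ m ih =>
    intro d
    rw [pvDecode]
    by_cases h : m = 0
    · simp [h]
    · simp only [dif_neg h]
      have hrest := ih (m / 2) (Nat.div_lt_self (Nat.pos_of_ne_zero h) one_lt_two) (d + 1)
      by_cases h2 : m % 2 = 1
      · simp only [if_pos h2, List.singleton_append, List.pairwise_cons]
        exact ⟨fun a ha => by have := pvDecode_ge _ _ _ ha; omega, hrest⟩
      · simpa [h2] using hrest

theorem pvDecode_ne_nil (m : Nat) : ∀ (d : Int), m ≠ 0 → pvDecode m d ≠ [] := by
  induction m using Nat.strong_induction_on with
  | _ m ih =>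
    intro d hm
    rw [pvDecode]
    simp only [dif_neg hm]
    by_cases h2 : m % 2 = 1
    · simp [h2]
    · have hm2 : m / 2 ≠ 0 := by omega
      simp only [if_neg h2, List.nil_append]
      exact ih (m / 2) (Nat.div_lt_self (Nat.pos_of_ne_zero hm) one_lt_two) (d + 1) hm2

-- the masked fold over a list of values in 1..7 records exactly membership in its bits
theorem foldl_mask_testBit (xs : List Int) : ∀ (m0 : Nat) (i : Nat),
    (∀ x ∈ xs, 1 ≤ x ∧ x ≤ 7) →
    (xs.foldl (fun m w => m ||| (1 <<< w.toNat)) m0).testBit i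
      = (m0.testBit i || decide ((i : Int) ∈ xs)) := by
  induction xs with
  | nil => simp
  | cons x xs ih =>
    intro m0 i h
    have hx := h x (by simp)
    rw [List.foldl_cons, ih _ i (fun y hy => h y (by simp [hy]))]
    rw [Nat.one_shiftLeft, Nat.testBit_or, Nat.testBit_two_pow]
    have hcast : (x.toNat = i) ↔ ((i : Int) = x) := by
      constructor
      · rintro rfl; omega
      · rintro rfl; simp
    by_cases hc : (i : Int) = x
    · simp [hc, hcast.mpr hc]
    · have : ¬ (x.toNat = i) := fun he => hc (hcast.mp he)
      simp [hc, this]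

-- fold with the guard inside = fold over the filtered list
theorem foldl_mask_filter (xs : List Int) : ∀ (m0 : Nat),
    xs.foldl (fun mask w =>
      if PySem.Str.strIsdigit (PySem.Int.toStr w) then
        if 1 ≤ w ∧ w ≤ 7 then mask ||| (1 <<< w.toNat) else mask
      else mask) m0
    = (xs.filter (fun w => PySem.Str.strIsdigit (PySem.Int.toStr w)
        && (decide (1 ≤ w) && decide (w ≤ 7)))).foldl
        (fun m w => m ||| (1 <<< w.toNat)) m0 := by
  induction xs with
  | nil => intro m0; rfl
  | cons x xs ih =>
    intro m0
    rw [List.foldl_cons, List.filter_cons]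
    by_cases h1 : PySem.Str.strIsdigit (PySem.Int.toStr x) = true
    · by_cases h2 : 1 ≤ x ∧ x ≤ 7
      · have hp : (PySem.Str.strIsdigit (PySem.Int.toStr x)
            && (decide (1 ≤ x) && decide (x ≤ 7))) = true := by
          rw [h1, Bool.true_and]
          simp [h2.1, h2.2]
        rw [if_pos h1, if_pos h2, if_pos hp, List.foldl_cons, ih]
      · have hp : ¬ ((PySem.Str.strIsdigit (PySem.Int.toStr x)
            && (decide (1 ≤ x) && decide (x ≤ 7))) = true) := by
          rw [h1, Bool.true_and]
          simp only [Bool.and_eq_true, decide_eq_true_eq]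
          exact h2
        rw [if_pos h1, if_neg h2, if_neg hp, ih]
    · have hp : ¬ ((PySem.Str.strIsdigit (PySem.Int.toStr x)
          && (decide (1 ≤ x) && decide (x ≤ 7))) = true) := by
        rw [eq_false_of_ne_true h1, Bool.false_and]
        exact Bool.false_ne_true
      rw [if_neg h1, if_neg hp, ih]

-- core: body of A = body of B on any concrete list ws
theorem normalize_body_eq (ws : List Int) :
    (let n1 := ws.filter (fun w => PySem.Str.strIsdigit (PySem.Int.toStr w));
     let n2 := n1.filter (fun w => decide (1 ≤ w) && decide (w ≤ 7));
     let n3 := PySem.List.sorted (PySem.List.dedup n2) (fun x => x) false;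
     if n3 = [] then [4, 5] else n3)
    = (let mask : Nat := ws.foldl (fun mask w =>
         if PySem.Str.strIsdigit (PySem.Int.toStr w) then
           if 1 ≤ w ∧ w ≤ 7 then mask ||| (1 <<< w.toNat) else mask
         else mask) 0;
       if mask = 0 then [4, 5]
       else pvDecodeLoop (mask >>> 1) 1 []) := by
  simp only
  -- unify the two filter pipelines
  have hfilt : (ws.filter (fun w => PySem.Str.strIsdigit (PySem.Int.toStr w))).filter
        (fun w => decide (1 ≤ w) && decide (w ≤ 7))
      = ws.filter (fun w => PySem.Str.strIsdigit (PySem.Int.toStr w)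
          && (decide (1 ≤ w) && decide (w ≤ 7))) := by
    rw [List.filter_filter]
    exact List.filter_congr (fun a _ => Bool.and_comm _ _)
  set n2 := ws.filter (fun w => PySem.Str.strIsdigit (PySem.Int.toStr w)
      && (decide (1 ≤ w) && decide (w ≤ 7))) with hn2
  have hbound : ∀ x ∈ n2, 1 ≤ x ∧ x ≤ 7 := by
    intro x hx
    rw [hn2, List.mem_filter] at hx
    simp only [Bool.and_eq_true, decide_eq_true_eq] at hx
    exact hx.2.2
  rw [hfilt, foldl_mask_filter, ← hn2]
  set mask := n2.foldl (fun m w => m ||| (1 <<< w.toNat)) 0 with hmask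
  have htb : ∀ i : Nat, mask.testBit i = decide ((i : Int) ∈ n2) := by
    intro i
    rw [hmask, foldl_mask_testBit n2 0 i hbound, Nat.zero_testBit, Bool.false_or]
  -- the decoded mask is exactly sorted(dedup n2)
  have hmem : ∀ a : Int, a ∈ pvDecode (mask >>> 1) 1 ↔ a ∈ n2 := by
    intro a
    rw [mem_pvDecode]
    constructor
    · rintro ⟨i, hb, rfl⟩
      rw [Nat.testBit_shiftRight, htb] at hb
      have : ((1 + i : Nat) : Int) ∈ n2 := of_decide_eq_true hb
      simpa [Int.natCast_add] using this
    · intro ha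
      have hb := hbound a ha
      refine ⟨(a - 1).toNat, ?_, ?_⟩
      · rw [Nat.testBit_shiftRight, htb, decide_eq_true_eq]
        have : ((1 + (a - 1).toNat : Nat) : Int) = a := by
          push_cast [Int.toNat_of_nonneg (by omega : (0:Int) ≤ a - 1)]; omega
        rwa [this]
      · rw [Int.toNat_of_nonneg (by omega : (0:Int) ≤ a - 1)]; omega
  have hsorted : PySem.List.sorted (PySem.List.dedup n2) (fun x => x) false
      = pvDecode (mask >>> 1) 1 := by
    apply PySem.List.sorted_eq_of_perm_of_pairwise_lt
    · rw [List.perm_ext_iff_of_nodup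
        ((pvDecode_pairwise (mask >>> 1) 1).nodup) (PySem.List.nodup_dedup n2)]
      intro a
      rw [hmem, PySem.List.mem_dedup]
    · exact pvDecode_pairwise (mask >>> 1) 1
  rw [hsorted, pvDecodeLoop_eq, List.nil_append]
  -- the two emptiness guards agree
  have hbit0 : mask.testBit 0 = false := by
    rw [htb, decide_eq_false_iff_not]
    intro h0
    have := hbound 0 h0
    omega
  rw [Nat.testBit_zero, decide_eq_false_iff_not] at hbit0
  by_cases hm : mask = 0
  · have : mask >>> 1 = 0 := by simp [hm]
    rw [if_pos hm, this, pvDecode]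
    simp
  · have hm2 : mask >>> 1 ≠ 0 := by
      rw [Nat.shiftRight_eq_div_pow, pow_one]
      omega
    rw [if_neg hm, if_neg (pvDecode_ne_nil _ 1 hm2)]

-- ===== VERDICT (by name: the statement is the Claim_ definition above) =====
theorem normalize_weekdays_py_spec : Claim_equal_normalize_weekdays_py := by
  intro weekdays _
  unfold Spec_normalize_weekdays_py normalize_weekdays_py normalize_weekdays_py_alt
  cases weekdays with
  | none => exact normalize_body_eq [4, 5]
  | some l =>
    by_cases hl : l = []
    · simp only [hl]; exact normalize_body_eq [4, 5]
    · simp only [if_neg hl]; exact normalize_body_eq l
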